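-- pv_equiv track=rewrite | github.com/nkawarai/keibaTools | 点数計算/BakenCombinationCalculator.py | calculate_3rentan_formation_points
-- ===== SOURCE A (Python) =====
-- def calculate_3rentan_formation_points(line1, line2, line3):
--     """
--     3連単フォーメーションの買い目点数を計算する
--     :param line1: 軸1の馬番号リスト
--     :param line2: 軸2の馬番号リスト
--     :param line3: 軸3の馬番号リスト
--     :return: 買い目の点数
--     """
--     permutations = []
--     for horse1 in line1:
--         for horse2 in line2:
--             if horse1 == horse2:  # 軸1と軸2で同じ馬を避ける
--                 continue
--             for horse3 in line3:
--                 if horse3 in (horse1, horse2):  # 同じ馬を避ける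
--                     continue
--                 permutations.append([horse1, horse2, horse3])
--     return len(permutations)
-- ===== SOURCE B (Python) =====
-- def calculate_3rentan_formation_points(line1, line2, line3):
--     """
--     3連単フォーメーションの買い目点数を計算する (counting arithmetic, no triple enumeration)
--     """
--     c2 = {}
--     for h in line2:
--         c2[h] = c2.get(h, 0) + 1
--     c3 = {}
--     for h in line3:
--         c3[h] = c3.get(h, 0) + 1
--     L2 = len(line2)
--     L3 = len(line3)
--     T = 0
--     for h in line2:
--         T += c3.get(h, 0)
--     total = 0
--     for h1 in line1:
--         a = c2.get(h1, 0)
--         b = c3.get(h1, 0)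
--         total += (L2 - a) * (L3 - b) - (T - a * b)
--     return total
-- ===== Notes on version B (the rewrite author's own statement) =====
-- stated objective: faster
-- what changed: Replaces the triple nested enumeration of all valid [h1,h2,h3] combinations by counting arithmetic: multiplicity counters for line2/line3 and a per-h1 inclusion-exclusion formula, one linear pass per list.
import Mathlib
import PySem

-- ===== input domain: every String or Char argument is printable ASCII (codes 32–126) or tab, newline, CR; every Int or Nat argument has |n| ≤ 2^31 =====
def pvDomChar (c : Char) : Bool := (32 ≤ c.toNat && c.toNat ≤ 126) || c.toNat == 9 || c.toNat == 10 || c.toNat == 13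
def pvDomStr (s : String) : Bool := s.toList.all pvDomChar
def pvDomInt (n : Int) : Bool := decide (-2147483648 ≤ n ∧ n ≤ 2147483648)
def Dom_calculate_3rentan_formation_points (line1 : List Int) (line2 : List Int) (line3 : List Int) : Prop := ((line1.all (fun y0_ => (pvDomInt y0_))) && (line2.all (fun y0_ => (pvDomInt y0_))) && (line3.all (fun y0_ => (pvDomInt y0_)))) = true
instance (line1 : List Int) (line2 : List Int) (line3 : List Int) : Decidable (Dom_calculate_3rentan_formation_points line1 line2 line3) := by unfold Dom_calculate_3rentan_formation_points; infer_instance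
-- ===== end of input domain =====

-- B replaces A's triple enumeration by counting arithmetic on per-line multiplicity counters
-- (inclusion–exclusion per axis-1 horse); same return value, O(n1+n2+n3) instead of O(n1*n2*n3).

-- ===== PORT A =====
-- literal transliteration: build the list of all valid [h1,h2,h3] and return its length
def calculate_3rentan_formation_points (line1 : List Int) (line2 : List Int) (line3 : List Int) : Int :=
  let permutations : List (List Int) :=
    line1.foldl (fun acc h1 =>
      line2.foldl (fun acc h2 =>
        if h1 = h2 then acc
        else
          line3.foldl (fun acc h3 =>
            if h3 = h1 ∨ h3 = h2 then acc else acc ++ [[h1, h2, h3]]) acc) acc) []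
  (permutations.length : Int)

-- ===== PORT B =====
-- transliteration of Source B: counters for line2/line3, T = Σ_{h∈line2} c3[h], then one pass over line1
def calculate_3rentan_formation_points_alt (line1 : List Int) (line2 : List Int) (line3 : List Int) : Int :=
  let c2 := PySem.Dict.counter line2
  let c3 := PySem.Dict.counter line3
  let L2 : Int := line2.length
  let L3 : Int := line3.length
  let T : Int := line2.foldl (fun s h => s + c3.getD h 0) 0
  line1.foldl (fun total h1 =>
    let a := c2.getD h1 0
    let b := c3.getD h1 0
    total + ((L2 - a) * (L3 - b) - (T - a * b))) 0

-- ===== PRECONDITION & SPEC =====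
def Spec_calculate_3rentan_formation_points (line1 : List Int) (line2 : List Int) (line3 : List Int) (out : Int) : Prop := out = calculate_3rentan_formation_points_alt line1 line2 line3
instance (line1 : List Int) (line2 : List Int) (line3 : List Int) (out : Int) : Decidable (Spec_calculate_3rentan_formation_points line1 line2 line3 out) := by unfold Spec_calculate_3rentan_formation_points; infer_instance

-- ===== CLAIM (what is proved, stated in full; the proofs are below) =====
def Claim_equal_calculate_3rentan_formation_points : Prop := ∀ (line1 : List Int) (line2 : List Int) (line3 : List Int), Dom_calculate_3rentan_formation_points line1 line2 line3 → Spec_calculate_3rentan_formation_points line1 line2 line3 (calculate_3rentan_formation_points line1 line2 line3)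

-- ===== LEMMAS AND PROOFS =====

-- T = Σ_{h∈l2} count of h in l3
def pvT (l2 l3 : List Int) : Int := (l2.map (fun h => ((l3.count h : Nat) : Int))).sum

-- per-h1 contribution
def pvF (l2 l3 : List Int) (h1 : Int) : Int :=
  ((l2.length : Int) - l2.count h1) * ((l3.length : Int) - l3.count h1)
    - (pvT l2 l3 - (l2.count h1 : Int) * (l3.count h1 : Int))

-- inner loop over line3 with a fixed distinct pair (h1,h2)
lemma pv_inner (h1 h2 : Int) (hne : h1 ≠ h2) (l3 : List Int) (acc : List (List Int)) :
    ((l3.foldl (fun acc h3 =>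
        if h3 = h1 ∨ h3 = h2 then acc else acc ++ [[h1, h2, h3]]) acc).length : Int)
    = acc.length + ((l3.length : Int) - l3.count h1 - l3.count h2) := by
  induction l3 generalizing acc with
  | nil => simp
  | cons x t ih =>
    by_cases hx1 : x = h1 <;> by_cases hx2 : x = h2 <;>
      simp_all <;> omega

-- middle loop over line2 for a fixed h1
lemma pv_mid (h1 : Int) (l2 l3 : List Int) (acc : List (List Int)) :
    ((l2.foldl (fun acc h2 =>
        if h1 = h2 then acc
        else l3.foldl (fun acc h3 =>
          if h3 = h1 ∨ h3 = h2 then acc else acc ++ [[h1, h2, h3]]) acc) acc).length : Int)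
    = acc.length + pvF l2 l3 h1 := by
  induction l2 generalizing acc with
  | nil => simp [pvF, pvT]
  | cons x t ih =>
    by_cases hx : h1 = x
    · subst hx
      rw [List.foldl_cons, if_pos rfl, ih]
      simp only [pvF, pvT, List.count_cons, List.map_cons, List.sum_cons, List.length_cons,
        BEq.rfl, if_true]
      push_cast
      ring
    · rw [List.foldl_cons, if_neg hx, ih, pv_inner h1 x hx l3 acc]
      have hx1 : (h1 == x) = false := by simp [hx]
      have hx2 : (x == h1) = false := by simp [Ne.symm hx]
      simp only [pvF, pvT, List.count_cons, List.map_cons, List.sum_cons, List.length_cons, hx2]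
      push_cast
      ring

-- outer loop of A
lemma pv_outer (l1 l2 l3 : List Int) (acc : List (List Int)) :
    ((l1.foldl (fun acc h1 =>
        l2.foldl (fun acc h2 =>
          if h1 = h2 then acc
          else l3.foldl (fun acc h3 =>
            if h3 = h1 ∨ h3 = h2 then acc else acc ++ [[h1, h2, h3]]) acc) acc) acc).length : Int)
    = acc.length + (l1.map (pvF l2 l3)).sum := by
  induction l1 generalizing acc with
  | nil => simp
  | cons x t ih => simp [ih, pv_mid]; ring

-- B's T-loop computes pvT
lemma pv_Tloop (l2 l3 : List Int) (s : Int) :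
    l2.foldl (fun s h => s + (PySem.Dict.counter l3).getD h 0) s = s + pvT l2 l3 := by
  induction l2 generalizing s with
  | nil => simp [pvT]
  | cons x t ih =>
    rw [List.foldl_cons, ih]
    simp [pvT, PySem.Dict.getD_counter]
    ring

-- B's main loop accumulates pvF
lemma pv_Bloop (l1 l2 l3 : List Int) (t : Int) :
    l1.foldl (fun total h1 =>
      total + (((l2.length : Int) - (PySem.Dict.counter l2).getD h1 0) *
                 ((l3.length : Int) - (PySem.Dict.counter l3).getD h1 0)
               - (pvT l2 l3 - (PySem.Dict.counter l2).getD h1 0 *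
                  (PySem.Dict.counter l3).getD h1 0))) t
    = t + (l1.map (pvF l2 l3)).sum := by
  induction l1 generalizing t with
  | nil => simp
  | cons x t1 ih =>
    rw [List.foldl_cons, ih]
    simp [pvF, PySem.Dict.getD_counter]
    ring

-- ===== VERDICT (by name: the statement is the Claim_ definition above) =====
theorem calculate_3rentan_formation_points_spec : Claim_equal_calculate_3rentan_formation_points := by
  intro line1 line2 line3 _
  show _ = _
  unfold calculate_3rentan_formation_points calculate_3rentan_formation_points_alt
  simp only [pv_outer, pv_Tloop, pv_Bloop, List.length_nil, Int.natCast_zero, zero_add]
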